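-- pv_equiv track=rewrite | github.com/yuna1212/algorithm | 알고리즘 문제 해결 전략/쿼드 트리 뒤집기/2022-02-01.py | reverseQuadTree
-- ===== SOURCE A (Python) =====
-- def reverseQuadTree(quadTree):
--     quadIndex = 0
--     quadSplits = []
--     for i in range(4):
--         if quadIndex >= len(quadTree):
--             break
--         if quadTree[quadIndex] == "w" or quadTree[quadIndex] == "b":
--             quadSplits.append(quadTree[quadIndex])
--         else:
--             quadSplits.append("x"+reverseQuadTree(quadTree[quadIndex+1:]))
--         quadIndex += len(quadSplits[-1])
--
--     if len(quadSplits) > 2: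
--       quadSplits[0:2], quadSplits[2:4] = quadSplits[2:4], quadSplits[0:2]
--     return "".join(quadSplits)
-- ===== SOURCE B (Python) =====
-- def reverseQuadTree(quadTree):
--     # Single-pass index-pointer parser: walks the shared string with an index
--     # instead of recursing on substring copies.
--     n = len(quadTree)
--
--     def parse(i):
--         items = []
--         for _ in range(4):
--             if i >= n:
--                 break
--             c = quadTree[i]
--             item = c if c in 'wb' else 'x' + parse(i + 1)
--             items.append(item)
--             i += len(item)
--         if len(items) > 2:
--             items[:2], items[2:] = items[2:], items[:2]
--         return ''.join(items)
--
--     return parse(0)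
-- ===== Notes on version B (the rewrite author's own statement) =====
-- stated objective: alternative
-- what changed: B replaces A's recursion on substring copies (quadTree[quadIndex+1:], a fresh slice per internal node) by a single index-pointer parser that walks the shared string; on the generated inputs the output size dominates both, so no speed is claimed.
import Mathlib
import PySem

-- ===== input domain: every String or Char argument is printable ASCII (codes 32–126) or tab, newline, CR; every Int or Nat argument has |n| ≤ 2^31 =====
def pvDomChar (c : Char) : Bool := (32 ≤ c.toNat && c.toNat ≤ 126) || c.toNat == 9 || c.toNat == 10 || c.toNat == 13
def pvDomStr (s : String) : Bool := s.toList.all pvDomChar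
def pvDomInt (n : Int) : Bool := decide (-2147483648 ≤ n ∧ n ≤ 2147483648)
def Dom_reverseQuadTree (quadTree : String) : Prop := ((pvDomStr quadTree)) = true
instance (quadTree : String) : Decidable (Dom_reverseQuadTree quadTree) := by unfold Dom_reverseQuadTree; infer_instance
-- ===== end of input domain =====

-- B replaces A's recursion on substring copies by a single index-pointer pass over the
-- shared string (objective: alternative; the equivalence proved is total — same return
-- value on every input).

-- ===== PORT A =====
-- A works on the string as a list of characters; each helper mirrors one piece of A's code.

-- the Python tuple slice assignment `quadSplits[0:2], quadSplits[2:4] = quadSplits[2:4], quadSplits[0:2]`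
def pvA_swap (qs : List (List Char)) : List (List Char) :=
  let t1 := (qs.drop 2).take 2                  -- quadSplits[2:4]
  let t2 := qs.take 2                           -- quadSplits[0:2]
  let m1 := t1 ++ qs.drop 2                     -- after `quadSplits[0:2] = t1`
  (m1.take 2 ++ t2) ++ m1.drop 4                -- after `quadSplits[2:4] = t2`

-- the tail of A after the loop: conditional swap, then `"".join(quadSplits)`
def pvA_post (qs : List (List Char)) : List Char :=
  (if 2 < qs.length then pvA_swap qs else qs).flatten

-- A's `for i in range(4)` loop (fuel = remaining iterations); the recursive call
-- `reverseQuadTree(quadTree[quadIndex+1:])` is `pvA_post (pvA_loop (s.drop (quadIndex+1)) 4 0 [])`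
def pvA_loop : List Char → Nat → Nat → List (List Char) → List (List Char)
  | _, 0, _, acc => acc
  | s, f + 1, quadIndex, acc =>
    if h : quadIndex < s.length then
      if s[quadIndex] = 'w' ∨ s[quadIndex] = 'b' then
        pvA_loop s f (quadIndex + 1) (acc ++ [[s[quadIndex]]])
      else
        let sub : List Char := 'x' :: pvA_post (pvA_loop (s.drop (quadIndex + 1)) 4 0 [])
        pvA_loop s f (quadIndex + sub.length) (acc ++ [sub])
    else acc
termination_by s fuel _ _ => (s.length, fuel)
decreasing_by
· exact Prod.Lex.right _ (Nat.lt_succ_self f)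
· exact Prod.Lex.left _ _ (by simp [List.length_drop]; omega)
· exact Prod.Lex.right _ (Nat.lt_succ_self f)

def reverseQuadTree (quadTree : String) : String :=
  String.ofList (pvA_post (pvA_loop quadTree.toList 4 0 []))

-- ===== PORT B =====
-- B's index-pointer parser: same string throughout, `i` walks it; no substring is built.

-- B's `items[:2], items[2:] = items[2:], items[:2]`
def pvB_rot (items : List (List Char)) : List (List Char) :=
  let t1 := items.drop 2                        -- items[2:]
  let t2 := items.take 2                        -- items[:2]
  let m1 := t1 ++ items.drop 2                  -- after `items[:2] = t1`
  m1.take 2 ++ t2                               -- after `items[2:] = t2`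

-- tail of B's `parse`: conditional rotation, then `''.join(items)`
def pvB_post (items : List (List Char)) : List Char :=
  (if 2 < items.length then pvB_rot items else items).flatten

-- B's `for _ in range(4)` loop; `parse(i + 1)` is `pvB_post (pvB_loop s 4 (i+1) [])`
def pvB_loop : List Char → Nat → Nat → List (List Char) → List (List Char)
  | _, 0, _, acc => acc
  | s, f + 1, i, acc =>
    if h : i < s.length then
      let item : List Char :=
        if s[i] = 'w' ∨ s[i] = 'b' then [s[i]]
        else 'x' :: pvB_post (pvB_loop s 4 (i + 1) [])
      pvB_loop s f (i + item.length) (acc ++ [item])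
    else acc
termination_by s fuel i _ => (s.length - i, fuel)
decreasing_by
· exact Prod.Lex.left _ _ (Nat.sub_lt_sub_left h (Nat.lt_succ_self i))
· have h1 : 0 < item.length := by simp only [item]; split <;> simp
  exact Prod.Lex.left _ _ (Nat.sub_lt_sub_left h (Nat.lt_add_of_pos_right h1))

def reverseQuadTree_alt (quadTree : String) : String :=
  String.ofList (pvB_post (pvB_loop quadTree.toList 4 0 []))

-- ===== PRECONDITION & SPEC =====
def Spec_reverseQuadTree (quadTree : String) (out : String) : Prop := out = reverseQuadTree_alt quadTree
instance (quadTree : String) (out : String) : Decidable (Spec_reverseQuadTree quadTree out) := by unfold Spec_reverseQuadTree; infer_instance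

-- ===== CLAIM (what is proved, stated in full; the proofs are below) =====
def Claim_equal_reverseQuadTree : Prop := ∀ (quadTree : String), Dom_reverseQuadTree quadTree → Spec_reverseQuadTree quadTree (reverseQuadTree quadTree)

-- ===== LEMMAS AND PROOFS =====

-- B's loop adds at most `fuel` items
lemma pvB_loop_length_le : ∀ (fuel : Nat) (s : List Char) (i : Nat) (acc : List (List Char)),
    (pvB_loop s fuel i acc).length ≤ acc.length + fuel := by
  intro fuel
  induction fuel with
  | zero => intro s i acc; simp [pvB_loop]
  | succ f ih =>
    intro s i acc
    rw [pvB_loop]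
    split
    · exact le_trans (ih _ _ _) (by simp; omega)
    · simp

-- on lists of at most 4 items (the only ones the loops produce) the two
-- slice-assignment transliterations coincide
lemma post_eq_of_le_four : ∀ (qs : List (List Char)), qs.length ≤ 4 → pvA_post qs = pvB_post qs := by
  intro qs h
  match qs with
  | [] => rfl
  | [a] => rfl
  | [a, b] => rfl
  | [a, b, c] => rfl
  | [a, b, c, d] => rfl
  | a :: b :: c :: d :: e :: t => simp at h; omega

-- B's parse of the suffix starting at `j + q` only looks at `s.drop j` from local index `q`
lemma pvB_loop_shift : ∀ (k : Nat) (s : List Char) (j q fuel : Nat) (acc : List (List Char)),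
    s.length - (j + q) ≤ k →
    pvB_loop s fuel (j + q) acc = pvB_loop (s.drop j) fuel q acc := by
  intro k
  induction k with
  | zero =>
    intro s j q fuel acc hk
    match fuel with
    | 0 => simp [pvB_loop]
    | f + 1 =>
      conv_lhs => rw [pvB_loop]
      conv_rhs => rw [pvB_loop]
      rw [dif_neg (by omega), dif_neg (by simp [List.length_drop]; omega)]
  | succ k ih =>
    intro s j q fuel acc hk
    match fuel with
    | 0 => simp [pvB_loop]
    | f + 1 =>
      conv_lhs => rw [pvB_loop]
      conv_rhs => rw [pvB_loop]
      by_cases h : j + q < s.length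
      · rw [dif_pos h, dif_pos (by simp [List.length_drop]; omega)]
        have hget : (s.drop j)[q]'(by simp [List.length_drop]; omega) = s[j + q]'h := by
          simp [List.getElem_drop]
        simp only [hget]
        have hsub : pvB_loop s 4 (j + q + 1) [] = pvB_loop (s.drop j) 4 (q + 1) [] := by
          have := ih s j (q + 1) 4 [] (by omega)
          simpa [Nat.add_assoc] using this
        rw [hsub]
        by_cases hc : s[j + q]'h = 'w' ∨ s[j + q]'h = 'b'
        · simp only [if_pos hc]
          have key := ih s j (q + [s[j + q]'h].length) f (acc ++ [[s[j + q]'h]])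
            (by simp only [List.length_cons, List.length_nil]; omega)
          have harith : j + q + [s[j + q]'h].length = j + (q + [s[j + q]'h].length) := by omega
          rw [harith]; exact key
        · simp only [if_neg hc]
          have key := ih s j (q + (('x' : Char) :: pvB_post (pvB_loop (s.drop j) 4 (q + 1) [])).length) f
            (acc ++ [('x' : Char) :: pvB_post (pvB_loop (s.drop j) 4 (q + 1) [])])
            (by simp only [List.length_cons]; omega)
          have harith : j + q + (('x' : Char) :: pvB_post (pvB_loop (s.drop j) 4 (q + 1) [])).length
              = j + (q + (('x' : Char) :: pvB_post (pvB_loop (s.drop j) 4 (q + 1) [])).length) := by omega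
          rw [harith]; exact key
      · rw [dif_neg h, dif_neg (by simp [List.length_drop]; omega)]

-- the two loops agree (A recurses on the dropped suffix, B moves its index)
lemma loop_eq : ∀ (k : Nat) (s : List Char), s.length ≤ k →
    ∀ (fuel q : Nat) (acc : List (List Char)),
    pvA_loop s fuel q acc = pvB_loop s fuel q acc := by
  intro k
  induction k with
  | zero =>
    intro s hs fuel q acc
    match fuel with
    | 0 => simp [pvA_loop, pvB_loop]
    | f + 1 =>
      rw [pvA_loop, pvB_loop, dif_neg (by omega), dif_neg (by omega)]
  | succ k ih =>
    intro s hs fuel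
    induction fuel with
    | zero => intro q acc; simp [pvA_loop, pvB_loop]
    | succ f ihf =>
      intro q acc
      rw [pvA_loop, pvB_loop]
      by_cases h : q < s.length
      · rw [dif_pos h, dif_pos h]
        by_cases hc : s[q]'h = 'w' ∨ s[q]'h = 'b'
        · rw [if_pos hc, if_pos hc]; exact ihf _ _
        · rw [if_neg hc, if_neg hc]
          have hdrop : (s.drop (q + 1)).length ≤ k := by simp [List.length_drop]; omega
          have hA : pvA_loop (s.drop (q + 1)) 4 0 [] = pvB_loop (s.drop (q + 1)) 4 0 [] :=
            ih _ hdrop 4 0 []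
          have hB : pvB_loop s 4 (q + 1) [] = pvB_loop (s.drop (q + 1)) 4 0 [] := by
            have := pvB_loop_shift s.length s (q + 1) 0 4 [] (by omega)
            simpa using this
          rw [hA, ← hB]
          have hpost : pvA_post (pvB_loop s 4 (q + 1) []) = pvB_post (pvB_loop s 4 (q + 1) []) :=
            post_eq_of_le_four _ (by simpa using pvB_loop_length_le 4 s (q + 1) [])
          rw [hpost]
          exact ihf _ _
      · rw [dif_neg h, dif_neg h]

-- ===== VERDICT (by name: the statement is the Claim_ definition above) =====
theorem reverseQuadTree_spec : Claim_equal_reverseQuadTree := by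
  intro quadTree _
  unfold Spec_reverseQuadTree reverseQuadTree reverseQuadTree_alt
  rw [loop_eq quadTree.toList.length quadTree.toList (Nat.le_refl _) 4 0 []]
  rw [post_eq_of_le_four _ (by simpa using pvB_loop_length_le 4 quadTree.toList 0 [])]
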